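-- pv_equiv track=rewrite | github.com/wpowen/bestseller | src/bestseller/services/chapter_validator.py | _offset_to_paragraph
-- ===== SOURCE A (Python) =====
-- def _offset_to_paragraph(
--     text: str, absolute_offset: int, paragraphs: list[str]
-- ) -> tuple[int, int]:
--     """Translate an absolute char offset into ``(paragraph_idx, local_offset)``.
--
--     Paragraphs are separated by ``_PARAGRAPH_BREAK_RE``; we walk them in
--     order accumulating consumed text until the absolute offset falls inside
--     one. Returns ``(0, absolute_offset)`` as a safe default if we overshoot.
--     """
--
--     consumed = 0
--     for idx, para in enumerate(paragraphs):
--         # Locate this paragraph within ``text`` starting from ``consumed``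
--         # so repeated identical paragraphs don't collide.
--         start = text.find(para, consumed)
--         if start == -1:
--             # Should not happen since paragraphs came from splitting text,
--             # but guard anyway.
--             start = consumed
--         end = start + len(para)
--         if absolute_offset < end:
--             return idx, max(absolute_offset - start, 0)
--         consumed = end
--     return len(paragraphs) - 1, absolute_offset
-- ===== SOURCE B (Python) =====
-- def _offset_to_paragraph(
--     text: str, absolute_offset: int, paragraphs: list[str]
-- ) -> tuple[int, int]:
--     """Build start/end boundary tables in one pass, then answer the query
--     with a binary search (hand-written bisect_right) over the ends table."""
--     starts = []
--     ends = []
--     consumed = 0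
--     for para in paragraphs:
--         start = text.find(para, consumed)
--         if start == -1:
--             start = consumed
--         end = start + len(para)
--         starts.append(start)
--         ends.append(end)
--         consumed = end
--     # bisect_right over ends: first index whose end exceeds absolute_offset
--     lo, hi = 0, len(paragraphs)
--     while lo < hi:
--         mid = (lo + hi) // 2
--         if ends[mid] <= absolute_offset:
--             lo = mid + 1
--         else:
--             hi = mid
--     if lo < len(paragraphs):
--         return lo, max(absolute_offset - starts[lo], 0)
--     return len(paragraphs) - 1, absolute_offset
-- ===== Notes on version B (the rewrite author's own statement) =====
-- stated objective: alternative
-- what changed: Replaced A's interleaved early-exit scan by a build-then-search decomposition: one pass builds parallel start/end boundary tables, then a hand-written bisect_right over the (monotone) ends table answers the query.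
import Mathlib
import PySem

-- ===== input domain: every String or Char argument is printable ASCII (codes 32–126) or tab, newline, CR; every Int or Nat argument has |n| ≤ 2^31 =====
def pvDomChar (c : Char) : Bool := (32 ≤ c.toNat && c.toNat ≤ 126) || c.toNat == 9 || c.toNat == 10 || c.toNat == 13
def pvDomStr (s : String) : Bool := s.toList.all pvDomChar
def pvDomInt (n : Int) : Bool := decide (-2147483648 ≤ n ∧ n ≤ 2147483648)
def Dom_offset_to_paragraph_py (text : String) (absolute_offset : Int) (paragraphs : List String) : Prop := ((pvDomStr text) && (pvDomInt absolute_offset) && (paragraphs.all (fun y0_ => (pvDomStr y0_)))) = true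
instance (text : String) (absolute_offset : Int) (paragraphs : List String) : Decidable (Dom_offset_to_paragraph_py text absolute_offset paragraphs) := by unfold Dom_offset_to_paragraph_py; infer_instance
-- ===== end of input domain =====

-- B replaces A's interleaved early-exit scan by a build-boundary-tables-then-binary-search decomposition (alternative, same cost).

-- ===== PORT A =====
-- A's for-loop over paragraphs, carrying idx and consumed; on exhaustion idx = |paragraphs|,
-- so (idx - 1, ao) is A's final 'return len(paragraphs) - 1, absolute_offset'
def offsetA_go (text : String) (ao : Int) : List String → Int → Int → Int × Int
  | [], idx, _ => (idx - 1, ao)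
  | p :: rest, idx, consumed =>
      let start0 := PySem.Str.findFrom text p consumed
      let start := if start0 = -1 then consumed else start0
      let «end» := start + PySem.Str.len p
      if ao < «end» then (idx, max (ao - start) 0)
      else offsetA_go text ao rest (idx + 1) «end»

def offset_to_paragraph_py (text : String) (absolute_offset : Int) (paragraphs : List String) : Int × Int :=
  offsetA_go text absolute_offset paragraphs 0 0

-- ===== PORT B =====
-- Source B's build pass: parallel starts/ends tables (the appends become cons on the recursive result)
def offsetB_build (text : String) : List String → Int → List Int × List Int
  | [], _ => ([], [])
  | p :: rest, consumed =>
      let start0 := PySem.Str.findFrom text p consumed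
      let start := if start0 = -1 then consumed else start0
      let «end» := start + PySem.Str.len p
      let (ss, es) := offsetB_build text rest «end»
      (start :: ss, «end» :: es)

-- Source B's hand-written bisect_right while-loop (ends[mid] is in range whenever lo < hi ≤ |ends|, so getD is exact there)
def offsetB_bs (ends : List Int) (ao : Int) (lo hi : Nat) : Nat :=
  if _h : lo < hi then
    let mid := (lo + hi) / 2
    if ends.getD mid 0 ≤ ao then offsetB_bs ends ao (mid + 1) hi
    else offsetB_bs ends ao lo mid
  else lo
termination_by hi - lo
decreasing_by all_goals omega

def offset_to_paragraph_py_alt (text : String) (absolute_offset : Int) (paragraphs : List String) : Int × Int :=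
  let se := offsetB_build text paragraphs 0
  let starts := se.1
  let ends := se.2
  let n := paragraphs.length
  let lo := offsetB_bs ends absolute_offset 0 n
  if lo < n then ((lo : Int), max (absolute_offset - starts.getD lo 0) 0)
  else ((n : Int) - 1, absolute_offset)

-- ===== PRECONDITION & SPEC =====
def Spec_offset_to_paragraph_py (text : String) (absolute_offset : Int) (paragraphs : List String) (out : Int × Int) : Prop := out = offset_to_paragraph_py_alt text absolute_offset paragraphs
instance (text : String) (absolute_offset : Int) (paragraphs : List String) (out : Int × Int) : Decidable (Spec_offset_to_paragraph_py text absolute_offset paragraphs out) := by unfold Spec_offset_to_paragraph_py; infer_instance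

-- ===== CLAIM (what is proved, stated in full; the proofs are below) =====
def Claim_equal_offset_to_paragraph_py : Prop := ∀ (text : String) (absolute_offset : Int) (paragraphs : List String), Dom_offset_to_paragraph_py text absolute_offset paragraphs → Spec_offset_to_paragraph_py text absolute_offset paragraphs (offset_to_paragraph_py text absolute_offset paragraphs)

-- ===== LEMMAS AND PROOFS =====

-- findFrom with a nonnegative start either fails or answers at or after that start
lemma findFrom_not_lt (s sub : List Char) (c : Int) (h0 : 0 ≤ c) :
    PySem.Chars.findFrom s sub c none = -1 ∨ c ≤ PySem.Chars.findFrom s sub c none := by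
  unfold PySem.Chars.findFrom
  have := PySem.Chars.neg_one_le_find (List.drop c.toNat (List.take (Int.toNat ↑s.length) s)) sub
  split_ifs with h1 <;> simp_all <;> omega

lemma len_nonneg (p : String) : 0 ≤ PySem.Str.len p := by
  simp [PySem.Str.len_eq]

lemma build_lengths (text : String) (ps : List String) (c : Int) :
    (offsetB_build text ps c).1.length = ps.length ∧ (offsetB_build text ps c).2.length = ps.length := by
  induction ps generalizing c with
  | nil => simp [offsetB_build]
  | cons p rest ih => simp [offsetB_build, ih]

-- the guarded start is never left of the incoming consumed
lemma start_ge (text : String) (p : String) (c : Int) (h0 : 0 ≤ c) :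
    c ≤ (if PySem.Str.findFrom text p c = -1 then c else PySem.Str.findFrom text p c) := by
  have := findFrom_not_lt text.toList p.toList c h0
  rw [PySem.Str.findFrom_eq]
  split_ifs with h <;> simp_all

-- every end ≥ the incoming consumed, and the ends table is monotone
lemma build_sorted (text : String) (ps : List String) (c : Int) (h0 : 0 ≤ c) :
    (∀ e ∈ (offsetB_build text ps c).2, c ≤ e) ∧ (offsetB_build text ps c).2.Pairwise (· ≤ ·) := by
  induction ps generalizing c with
  | nil => simp [offsetB_build]
  | cons p rest ih =>
    simp only [offsetB_build]
    set s := if PySem.Str.findFrom text p c = -1 then c else PySem.Str.findFrom text p c with hs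
    have hcs : c ≤ s := start_ge text p c h0
    have hce : c ≤ s + PySem.Str.len p := by have := len_nonneg p; omega
    have h0e : 0 ≤ s + PySem.Str.len p := by omega
    obtain ⟨hall, hpw⟩ := ih (s + PySem.Str.len p) h0e
    constructor
    · intro e he
      simp at he
      rcases he with he | he
      · omega
      · have := hall e he; omega
    · simp [List.pairwise_cons]
      exact ⟨fun e he => hall e he, hpw⟩

-- A's scan, characterised by any index k that splits the ends table at ao
lemma goA_eq (text : String) (ao : Int) (ps : List String) (idx c : Int) (k : Nat)
    (hk : k ≤ ps.length)
    (hlt : ∀ j < k, (offsetB_build text ps c).2.getD j 0 ≤ ao)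
    (hge : ∀ j, k ≤ j → j < ps.length → ao < (offsetB_build text ps c).2.getD j 0) :
    offsetA_go text ao ps idx c =
      if k < ps.length then (idx + k, max (ao - (offsetB_build text ps c).1.getD k 0) 0)
      else (idx + ps.length - 1, ao) := by
  induction ps generalizing idx c k with
  | nil =>
    simp at hk
    simp [offsetA_go, hk]
  | cons p rest ih =>
    simp only [offsetA_go, offsetB_build]
    set s := if PySem.Str.findFrom text p c = -1 then c else PySem.Str.findFrom text p c with hs
    set e := s + PySem.Str.len p with he
    cases k with
    | zero =>
      have h0 : ao < e := by
        have := hge 0 (Nat.zero_le _) (by simp)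
        simpa [offsetB_build] using this
      simp [h0]
    | succ k' =>
      have h0 : e ≤ ao := by
        have := hlt 0 (Nat.succ_pos _)
        simpa [offsetB_build] using this
      have hne : ¬ ao < e := by omega
      rw [if_neg hne]
      have := ih (idx + 1) e k' (by simpa using hk)
        (fun j hj => by
          have := hlt (j+1) (by omega)
          simpa [offsetB_build] using this)
        (fun j hj1 hj2 => by
          have := hge (j+1) (by omega) (by simpa using hj2)
          simpa [offsetB_build] using this)
      rw [this]
      by_cases hlt2 : k' < rest.length
      · have hc : (k' + 1) < (p :: rest).length := by simp; omega
        rw [if_pos hlt2, if_pos hc]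
        simp only [List.getD_cons_succ, Prod.mk.injEq]
        exact ⟨by push_cast; ring, trivial⟩
      · have hc : ¬ ((k' + 1) < (p :: rest).length) := by simp; omega
        rw [if_neg hlt2, if_neg hc]
        simp only [List.length_cons, Prod.mk.injEq]
        exact ⟨by push_cast; ring, trivial⟩

-- Source B's while-loop is PySem's bisect_right loop when the bounds are in range
lemma bs_eq_loop (ends : List Int) (ao : Int) (fuel lo hi : Nat)
    (hhi : hi ≤ ends.length) (hf : hi - lo ≤ fuel) :
    offsetB_bs ends ao lo hi = PySem.List.bisectRightLoop ends ao fuel lo hi := by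
  induction fuel generalizing lo hi with
  | zero =>
    have : ¬ lo < hi := by omega
    rw [offsetB_bs, dif_neg this]
    simp [PySem.List.bisectRightLoop]
  | succ fuel ih =>
    rw [offsetB_bs]
    by_cases h : lo < hi
    · rw [dif_pos h]
      have hm : (lo + hi) / 2 < ends.length := by omega
      have hsome : ends[(lo + hi) / 2]? = some (ends[(lo + hi) / 2]'hm) := by
        simp [List.getElem?_eq_getElem hm]
      have hgd : ends.getD ((lo + hi) / 2) 0 = ends[(lo + hi) / 2]'hm := by
        simp [List.getD_eq_getElem?_getD, hsome]
      simp only [PySem.List.bisectRightLoop, if_pos h, hsome]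
      by_cases hle : ends[(lo + hi) / 2]'hm ≤ ao
      · rw [if_pos (hgd ▸ hle), if_neg (by omega), ih _ _ hhi (by omega)]
      · rw [if_neg (by omega), if_pos (by omega), ih _ _ (by omega) (by omega)]
    · rw [dif_neg h]
      simp [PySem.List.bisectRightLoop, h]

lemma ports_agree (text : String) (ao : Int) (ps : List String) :
    offset_to_paragraph_py text ao ps = offset_to_paragraph_py_alt text ao ps := by
  have hlen := build_lengths text ps 0
  have hsorted := (build_sorted text ps 0 le_rfl).2
  have hspec := PySem.List.bisectRight_spec (offsetB_build text ps 0).2 ao hsorted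
  set es := (offsetB_build text ps 0).2 with hes
  set k := PySem.List.bisectRight es ao with hk
  obtain ⟨hkle, hlt, hge⟩ := hspec
  have hbs : offsetB_bs es ao 0 ps.length = k := by
    rw [hk, PySem.List.bisectRight, ← hlen.2]
    exact bs_eq_loop es ao es.length 0 es.length le_rfl (by omega)
  have hA := goA_eq text ao ps 0 0 k (by omega)
    (fun j hj => by
      have hjl : j < es.length := by omega
      rw [← hes, List.getD_eq_getElem _ _ hjl]
      exact hlt j hjl hj)
    (fun j hj1 hj2 => by
      have hjl : j < es.length := by omega
      rw [← hes, List.getD_eq_getElem _ _ hjl]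
      exact hge j hjl hj1)
  simp only [offset_to_paragraph_py, offset_to_paragraph_py_alt, hA, ← hes, hbs]
  split_ifs with h
  · simp
  · simp

-- ===== VERDICT (by name: the statement is the Claim_ definition above) =====
theorem offset_to_paragraph_py_spec : Claim_equal_offset_to_paragraph_py := by
  intro text ao ps _
  exact ports_agree text ao ps
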